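-- pv_equiv track=rewrite | github.com/vidun-jay/comp1405 | tutorial-10/comp1405_f21_101224988_tutorial_10_a.py | recursion
-- ===== SOURCE A (Python) =====
-- def recursion(int_list, destination):
--     odds = destination
--
--     #if odd add 10
--     if int_list[0] % 2 == 1:
--         odds.append(int_list[0] + 10)
--
--     #if not don't change
--     else:
--         odds.append(int_list[0])
--
--     #as long as list is bigger than 0 (which is the base case), call itself
--     if len(int_list) > 1:
--         recursion(int_list[1:], odds)
--
--     return odds
-- ===== SOURCE B (Python) =====
-- def recursion(int_list, destination):
--     # Iterative single pass: append x+10 for odd x, x otherwise, into the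
--     # same destination list (mutated in place, like A) and return it.
--     for x in int_list:
--         destination.append(x + 10 if x % 2 == 1 else x)
--     return destination
-- ===== Notes on version B (the rewrite author's own statement) =====
-- stated objective: simpler
-- what changed: Replaced head-recursion with slice copies by a single iterative for-loop appending into the same destination list.
import Mathlib
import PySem

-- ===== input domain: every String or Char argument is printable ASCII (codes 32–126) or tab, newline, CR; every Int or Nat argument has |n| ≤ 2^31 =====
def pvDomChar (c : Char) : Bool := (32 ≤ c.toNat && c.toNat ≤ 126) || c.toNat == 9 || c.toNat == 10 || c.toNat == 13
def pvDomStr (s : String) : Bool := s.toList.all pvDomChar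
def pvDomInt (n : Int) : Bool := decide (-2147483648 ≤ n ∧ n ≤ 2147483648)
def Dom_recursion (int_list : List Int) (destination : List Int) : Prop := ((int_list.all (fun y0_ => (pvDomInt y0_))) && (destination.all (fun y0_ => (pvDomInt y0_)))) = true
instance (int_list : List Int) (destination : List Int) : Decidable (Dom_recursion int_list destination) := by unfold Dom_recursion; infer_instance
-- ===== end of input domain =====

-- B replaces A's head-recursion (which copies int_list[1:] at every level) by one iterative
-- append loop over the same destination; equivalence is about the return value (both mutate
-- the same destination list in Python).


-- ===== PORT A =====
-- A accesses int_list[0] (IndexError on []: outside Pre_), appends h+10 if h is odd else h,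
-- then recurses on the slice int_list[1:] when len > 1, returning the mutated odds list.
def recursion (int_list : List Int) (destination : List Int) : List Int :=
  match int_list with
  | [] => destination   -- unreachable inside Pre_ (Python raises IndexError here)
  | h :: t =>
    let odds := destination ++ (if PySem.Int.mod h 2 = 1 then [h + 10] else [h])
    if t.length > 0 then recursion t odds else odds

-- ===== PORT B =====
def recursion_alt (int_list : List Int) (destination : List Int) : List Int :=
  int_list.foldl (fun acc x => acc ++ [if PySem.Int.mod x 2 = 1 then x + 10 else x]) destination

-- ===== PRECONDITION & SPEC =====
-- A raises IndexError on an empty int_list; Pre_ excludes exactly that.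
def Pre_recursion (int_list : List Int) (destination : List Int) : Prop := int_list ≠ []
instance (int_list : List Int) (destination : List Int) : Decidable (Pre_recursion int_list destination) := by unfold Pre_recursion; infer_instance
def pvWitness_recursion : List Int × List Int := ([1, 2, 3], [0])

def Spec_recursion (int_list : List Int) (destination : List Int) (out : List Int) : Prop := out = recursion_alt int_list destination
instance (int_list : List Int) (destination : List Int) (out : List Int) : Decidable (Spec_recursion int_list destination out) := by unfold Spec_recursion; infer_instance

-- ===== CLAIM (what is proved, stated in full; the proofs are below) =====
def Claim_equal_recursion : Prop := ∀ (int_list : List Int) (destination : List Int), Dom_recursion int_list destination → Pre_recursion int_list destination → Spec_recursion int_list destination (recursion int_list destination)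

-- ===== LEMMAS AND PROOFS =====
theorem recursion_cons (h : Int) (t : List Int) (d : List Int) :
    recursion (h :: t) d =
      (if t.length > 0 then recursion t (d ++ (if PySem.Int.mod h 2 = 1 then [h + 10] else [h]))
       else d ++ (if PySem.Int.mod h 2 = 1 then [h + 10] else [h])) := by
  conv_lhs => rw [recursion.eq_def]

theorem step_eq (h : Int) (d : List Int) :
    d ++ (if PySem.Int.mod h 2 = 1 then [h + 10] else [h]) =
      d ++ [if PySem.Int.mod h 2 = 1 then h + 10 else h] := by
  split_ifs <;> rfl

theorem recursion_eq_alt (int_list : List Int) (destination : List Int) :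
    int_list ≠ [] → recursion int_list destination = recursion_alt int_list destination := by
  induction int_list generalizing destination with
  | nil => intro h; exact absurd rfl h
  | cons h t ih =>
    intro _
    rw [recursion_cons]
    cases t with
    | nil => rw [if_neg (by simp), step_eq]; simp [recursion_alt]
    | cons a s =>
      rw [if_pos (by simp), ih _ (by simp), step_eq]
      simp [recursion_alt]

-- ===== VERDICT (by name: the statement is the Claim_ definition above) =====
theorem recursion_spec : Claim_equal_recursion := by
  intro il d _ hpre
  exact recursion_eq_alt il d hpre
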